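-- pv_equiv track=rewrite | github.com/Leon-Ware/PhishPunch | analysis.py | consecutive_chars
-- ===== SOURCE A (Python) =====
-- def consecutive_chars(data, vowels):
--     data = data.lower()
--
--     if vowels:  # If vowels = true, count consecutive vowels
--         chars = "aeiou"
--     else:
--         chars = "bcdfghjklmnpqrstvwxyz"
--
--     consecutive_count = 0
--     max_count = 0
--
--     for i in range(len(data)):
--         if data[i] in chars:
--             consecutive_count += 1  # If in the list, increase consecutive count
--         else:
--             consecutive_count = 0  # If not in the list, reset our current count
--
--         if consecutive_count > max_count:  # If we reach a new max count, update
--             max_count = consecutive_count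
--
--     return max_count
-- ===== SOURCE B (Python) =====
-- def consecutive_chars(data, vowels):
--     data = data.lower()
--     chars = "aeiou" if vowels else "bcdfghjklmnpqrstvwxyz"
--     best = 0
--     i = 0
--     n = len(data)
--     while i < n:
--         if data[i] in chars:
--             j = i + 1
--             while j < n and data[j] in chars:
--                 j += 1
--             if j - i > best:
--                 best = j - i
--             i = j
--         else:
--             i += 1
--     return best
-- ===== Notes on version B (the rewrite author's own statement) =====
-- stated objective: alternative
-- what changed: Replaces the per-character running-counter/max fold with a two-pointer run scan that jumps over each maximal run of matching characters and keeps the best run length.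
import Mathlib
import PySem

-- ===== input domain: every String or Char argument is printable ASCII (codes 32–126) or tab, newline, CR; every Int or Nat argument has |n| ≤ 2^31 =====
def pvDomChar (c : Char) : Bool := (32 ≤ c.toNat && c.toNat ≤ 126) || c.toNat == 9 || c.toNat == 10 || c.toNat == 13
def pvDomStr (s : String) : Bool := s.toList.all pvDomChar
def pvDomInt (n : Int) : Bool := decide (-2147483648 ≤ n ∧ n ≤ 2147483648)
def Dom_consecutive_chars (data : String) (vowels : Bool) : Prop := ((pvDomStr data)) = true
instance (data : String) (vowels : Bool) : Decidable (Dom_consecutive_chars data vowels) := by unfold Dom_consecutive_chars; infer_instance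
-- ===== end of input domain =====

-- B replaces A's per-character running-counter/max fold by a two-pointer run scan
-- (jump over each maximal matching run, keep the best run length): alternative decomposition.

-- ===== PORT A =====
-- A: lowercase, then fold over the characters threading (consecutive_count, max_count).
def consecutive_chars (data : String) (vowels : Bool) : Int :=
  let d := PySem.Chars.lower data.toList
  let chars : List Char := if vowels then "aeiou".toList else "bcdfghjklmnpqrstvwxyz".toList
  let st := d.foldl (fun (p : Int × Int) c =>
      let cc : Int := if chars.contains c then p.1 + 1 else 0
      (cc, if cc > p.2 then cc else p.2)) (0, 0)
  st.2

-- ===== PORT B =====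
-- B's run scan: skip non-matching chars; at a matching char, measure the whole run
-- (the inner `while j < n and data[j] in chars` = takeWhile) and continue after it.
def ccAltGo (chars : List Char) : List Char → Int
  | [] => 0
  | c :: cs =>
    if chars.contains c then
      let run : Int := 1 + (cs.takeWhile (fun x => chars.contains x)).length
      let rest := cs.dropWhile (fun x => chars.contains x)
      max run (ccAltGo chars rest)
    else ccAltGo chars cs
termination_by l => l.length
decreasing_by
  · exact Nat.lt_succ_of_le (List.length_dropWhile_le _ _)
  · simp

def consecutive_chars_alt (data : String) (vowels : Bool) : Int :=
  let d := PySem.Chars.lower data.toList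
  let chars : List Char := if vowels then "aeiou".toList else "bcdfghjklmnpqrstvwxyz".toList
  ccAltGo chars d

-- ===== PRECONDITION & SPEC =====
def Spec_consecutive_chars (data : String) (vowels : Bool) (out : Int) : Prop := out = consecutive_chars_alt data vowels
instance (data : String) (vowels : Bool) (out : Int) : Decidable (Spec_consecutive_chars data vowels out) := by unfold Spec_consecutive_chars; infer_instance

-- ===== CLAIM (what is proved, stated in full; the proofs are below) =====
def Claim_equal_consecutive_chars : Prop := ∀ (data : String) (vowels : Bool), Dom_consecutive_chars data vowels → Spec_consecutive_chars data vowels (consecutive_chars data vowels)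

-- ===== LEMMAS AND PROOFS =====

theorem ccAltGo_nonneg (chars : List Char) (l : List Char) : 0 ≤ ccAltGo chars l := by
  induction l using ccAltGo.induct chars with
  | case1 => simp [ccAltGo]
  | case2 c cs h x ih =>
      rw [ccAltGo, if_pos h]
      exact le_max_of_le_right ih
  | case3 c cs h ih => rw [ccAltGo, if_neg h]; exact ih

-- ccAltGo l = max (leading run length) (ccAltGo (after the leading run))
theorem ccAltGo_eq_max (chars : List Char) (l : List Char) :
    ccAltGo chars l =
      max ((l.takeWhile (fun x => chars.contains x)).length : Int)
          (ccAltGo chars (l.dropWhile (fun x => chars.contains x))) := by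
  cases l with
  | nil => simp [ccAltGo]
  | cons c cs =>
      by_cases h : chars.contains c = true
      · rw [ccAltGo, if_pos h]
        rw [List.takeWhile_cons_of_pos (p := fun x => chars.contains x) h,
            List.dropWhile_cons_of_pos (p := fun x => chars.contains x) h]
        simp only [List.length_cons]
        push_cast
        ring_nf
      · rw [ccAltGo, if_neg h]
        rw [List.takeWhile_cons_of_neg (p := fun x => chars.contains x) (by simpa using h),
            List.dropWhile_cons_of_neg (p := fun x => chars.contains x) (by simpa using h)]
        simp only [List.length_nil, Int.natCast_zero]
        conv_rhs => rw [ccAltGo, if_neg h]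
        exact (max_eq_right (ccAltGo_nonneg chars cs)).symm

theorem fold_key (chars : List Char) (l : List Char) (cnt mx : Int)
    (h1 : 0 ≤ cnt) (h2 : cnt ≤ mx) :
    (l.foldl (fun (p : Int × Int) c =>
        let cc : Int := if chars.contains c then p.1 + 1 else 0
        (cc, if cc > p.2 then cc else p.2)) (cnt, mx)).2 =
      max mx (max (cnt + (l.takeWhile (fun x => chars.contains x)).length)
                  (ccAltGo chars (l.dropWhile (fun x => chars.contains x)))) := by
  induction l generalizing cnt mx with
  | nil =>
      have := ccAltGo_nonneg chars ([] : List Char)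
      simp [ccAltGo]; omega
  | cons c cs ih =>
      by_cases h : chars.contains c = true
      · rw [List.takeWhile_cons_of_pos (p := fun x => chars.contains x) h,
            List.dropWhile_cons_of_pos (p := fun x => chars.contains x) h]
        simp only [List.foldl_cons, h, if_true]
        have hle : cnt + 1 ≤ if cnt + 1 > mx then cnt + 1 else mx := by
          split <;> omega
        rw [ih (cnt + 1) _ (by omega) hle]
        simp only [List.length_cons]
        push_cast
        split <;> omega
      · rw [List.takeWhile_cons_of_neg (p := fun x => chars.contains x) (by simpa using h),
            List.dropWhile_cons_of_neg (p := fun x => chars.contains x) (by simpa using h)]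
        simp only [List.foldl_cons, h, if_false, Bool.false_eq_true]
        have hlt : ¬ ((0 : Int) > mx) := by omega
        rw [if_neg hlt, ih 0 mx le_rfl (by omega)]
        have hgo : ccAltGo chars (c :: cs) = ccAltGo chars cs := by
          rw [ccAltGo, if_neg h]
        rw [hgo, ccAltGo_eq_max chars cs]
        simp only [List.length_nil, Int.natCast_zero]
        have := ccAltGo_nonneg chars (cs.dropWhile (fun x => chars.contains x))
        omega

-- ===== VERDICT (by name: the statement is the Claim_ definition above) =====
theorem consecutive_chars_spec : Claim_equal_consecutive_chars := by
  intro data vowels _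
  unfold Spec_consecutive_chars
  simp only [consecutive_chars, consecutive_chars_alt]
  rw [fold_key _ _ 0 0 le_rfl le_rfl]
  rw [zero_add, ← ccAltGo_eq_max]
  exact max_eq_right (ccAltGo_nonneg _ _)
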